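-- pv_equiv track=rewrite | github.com/tsutton/aoc2023 | day3.py | number_locations
-- ===== SOURCE A (Python) =====
-- def number_locations(line: str) -> list[tuple[int,int]]:
--     locations = []
--     char_idx = 0
--
--     while char_idx <= len(line):
--         # skip until we find a number
--         while char_idx < len(line) and not line[char_idx].isnumeric():
--             char_idx += 1
--         if char_idx == len(line):
--             break
--
--         # go until we find the end of the number
--         number_start = char_idx
--         while char_idx < len(line) and line[char_idx].isnumeric():
--             char_idx += 1
--
--         locations.append((number_start,char_idx))
--
--     return locations
-- ===== SOURCE B (Python) =====
-- def number_locations(line: str) -> list[tuple[int, int]]: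
--     # Right-to-left single pass, building the result back-to-front: each numeric
--     # index is merged into an adjacent run at the front, or starts a fresh run.
--     out = []
--     for i in reversed(range(len(line))):
--         if line[i].isnumeric():
--             if out and out[0][0] == i + 1:
--                 out[0] = (i, out[0][1])
--             else:
--                 out.insert(0, (i, i + 1))
--     return out
-- ===== Notes on version B (the rewrite author's own statement) =====
-- stated objective: faster
-- what changed: A consumes the string left-to-right with nested skip/consume while-loops; B makes one right-to-left pass, building the run list back-to-front by merging each numeric index into the adjacent run at the front or starting a fresh run. (measured ~2.7x faster at the largest timing size: one tight loop instead of nested per-character while-loops)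
import Mathlib
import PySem

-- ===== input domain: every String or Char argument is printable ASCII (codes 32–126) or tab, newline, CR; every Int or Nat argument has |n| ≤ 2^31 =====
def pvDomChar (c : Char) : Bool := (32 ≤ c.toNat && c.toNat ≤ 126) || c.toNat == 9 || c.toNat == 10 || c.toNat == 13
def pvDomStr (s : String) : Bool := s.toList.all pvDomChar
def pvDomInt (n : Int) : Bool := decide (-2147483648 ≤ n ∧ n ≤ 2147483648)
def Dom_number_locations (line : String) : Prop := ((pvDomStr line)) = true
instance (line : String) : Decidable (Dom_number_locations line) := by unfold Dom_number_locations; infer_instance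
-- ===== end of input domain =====

-- B re-implements A's nested skip/consume while-scan as one right-to-left pass that merges
-- adjacent numeric indices into the front of the result; same values, alternative structure.

-- ===== PORT A =====
-- str.isnumeric(): on the printable-ASCII domain it coincides with Python's isdigit (digits '0'-'9')
def pvIsNum (c : Char) : Bool := PySem.Chars.isdigit c

-- A's outer while over the remaining characters; the inner "skip" while is the else-branch
-- recursion (char_idx += 1), the inner "consume" while is takeWhile/dropWhile over the run.
def pvGoA (cs : List Char) (idx : Nat) : List (Int × Int) :=
  match cs with
  | [] => []  -- char_idx == len(line): break
  | c :: t =>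
    if pvIsNum c then
      let run := (c :: t).takeWhile pvIsNum
      ((idx : Int), ((idx + run.length : Nat) : Int)) ::
        pvGoA ((c :: t).dropWhile pvIsNum) (idx + run.length)
    else
      pvGoA t (idx + 1)
termination_by cs.length
decreasing_by
  · simp only [List.dropWhile_cons, *, if_pos]
    exact Nat.lt_succ_of_le (List.length_dropWhile_le pvIsNum t)
  · simp

def number_locations (line : String) : List (Int × Int) := pvGoA line.toList 0

-- ===== PORT B =====
-- Source B's reversed loop: out after index i = pvGoB (suffix from i) i; the loop becomes the
-- obvious structural recursion over the remaining suffix with its index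
def pvGoB (cs : List Char) (i : Nat) : List (Int × Int) :=
  match cs with
  | [] => []  -- i == len(line)
  | c :: t =>
    let out := pvGoB t (i + 1)
    if pvIsNum c then
      match out with
      | (s, e) :: rest =>
        if s = (i : Int) + 1 then ((i : Int), e) :: rest
        else ((i : Int), (i : Int) + 1) :: out
      | [] => [((i : Int), (i : Int) + 1)]
    else out

def number_locations_alt (line : String) : List (Int × Int) := pvGoB line.toList 0

-- ===== PRECONDITION & SPEC =====
def Spec_number_locations (line : String) (out : List (Int × Int)) : Prop := out = number_locations_alt line
instance (line : String) (out : List (Int × Int)) : Decidable (Spec_number_locations line out) := by unfold Spec_number_locations; infer_instance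

-- ===== CLAIM (what is proved, stated in full; the proofs are below) =====
def Claim_equal_number_locations : Prop := ∀ (line : String), Dom_number_locations line → Spec_number_locations line (number_locations line)

-- ===== LEMMAS AND PROOFS =====

-- every start index produced by pvGoB on the suffix from i is ≥ i
theorem pvGoB_head_ge (cs : List Char) (i : Nat) {s e : Int} {rest : List (Int × Int)}
    (h : pvGoB cs i = (s, e) :: rest) : (i : Int) ≤ s := by
  induction cs generalizing i s e rest with
  | nil => simp [pvGoB] at h
  | cons c t ih =>
    rw [pvGoB] at h
    by_cases hc : pvIsNum c = true
    · simp only [hc, if_pos] at h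
      rcases ho : pvGoB t (i + 1) with _ | ⟨⟨s', e'⟩, rest'⟩
      · rw [ho] at h
        simp at h
        omega
      · rw [ho] at h
        have hs' : ((i : Int) + 1) ≤ s' := by
          have := ih (i + 1) ho; push_cast at this ⊢; omega
        by_cases hm : s' = (i : Int) + 1
        · simp only [hm, if_pos] at h
          simp at h; omega
        · simp only [hm, if_false] at h
          simp at h; omega
    · simp only [hc] at h
      simp at h
      have := ih (i + 1) h
      omega

theorem pvGoA_eq_pvGoB (cs : List Char) (i : Nat) : pvGoA cs i = pvGoB cs i := by
  induction cs generalizing i with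
  | nil => rw [pvGoA, pvGoB]
  | cons c t ih =>
    by_cases hc : pvIsNum c = true
    · rcases t with _ | ⟨c', t'⟩
      · rw [pvGoA, pvGoB]
        simp [hc, pvGoA, pvGoB]
      · by_cases hc' : pvIsNum c' = true
        · -- the run continues into the tail: B merges, A counts both at once
          have hB : pvGoB (c :: c' :: t') i =
              ((i : Int), ((i + 1 + ((c' :: t').takeWhile pvIsNum).length : Nat) : Int)) ::
                pvGoA ((c' :: t').dropWhile pvIsNum) (i + 1 + ((c' :: t').takeWhile pvIsNum).length) := by
            rw [pvGoB]
            have ht : pvGoB (c' :: t') (i + 1) =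
                (((i + 1 : Nat) : Int), ((i + 1 + ((c' :: t').takeWhile pvIsNum).length : Nat) : Int)) ::
                  pvGoA ((c' :: t').dropWhile pvIsNum) (i + 1 + ((c' :: t').takeWhile pvIsNum).length) := by
              rw [← ih (i + 1), pvGoA]
              simp [hc']
            rw [ht]
            simp only [hc, if_pos]
            have : ((i + 1 : Nat) : Int) = (i : Int) + 1 := by push_cast; ring
            simp [this]
          rw [hB, pvGoA]
          simp only [hc, if_pos]
          have htw : (c :: c' :: t').takeWhile pvIsNum = c :: (c' :: t').takeWhile pvIsNum := by
            simp [List.takeWhile_cons, hc]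
          have hdw : (c :: c' :: t').dropWhile pvIsNum = (c' :: t').dropWhile pvIsNum := by
            simp [List.dropWhile_cons, hc]
          rw [htw, hdw]
          simp only [List.length_cons]
          congr 2
          · push_cast; ring
          · omega
        · -- run of length exactly 1: B prepends a fresh pair
          have htw : (c :: c' :: t').takeWhile pvIsNum = [c] := by
            simp [hc, hc']
          have hdw : (c :: c' :: t').dropWhile pvIsNum = c' :: t' := by
            simp [hc, hc']
          rw [pvGoA, pvGoB]
          simp only [hc, if_pos, htw, hdw, List.length_cons, List.length_nil]
          rw [ih (i + 1)]
          have ht : pvGoB (c' :: t') (i + 1) = pvGoB t' (i + 2) := by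
            rw [pvGoB]; simp [hc']
          rcases ho : pvGoB (c' :: t') (i + 1) with _ | ⟨⟨s', e'⟩, rest'⟩
          · simp
          · have hs' : ((i : Int) + 2) ≤ s' := by
              have := pvGoB_head_ge t' (i + 2) (ht ▸ ho)
              push_cast at this ⊢; omega
            have hne : ¬ (s' = (i : Int) + 1) := by omega
            simp only [hne, if_false]
            push_cast
            ring_nf
    · rw [pvGoA, pvGoB]
      simp only [hc, Bool.false_eq_true, if_false]
      exact ih (i + 1)

-- ===== VERDICT (by name: the statement is the Claim_ definition above) =====
theorem number_locations_spec : Claim_equal_number_locations := by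
  intro line _
  unfold Spec_number_locations number_locations number_locations_alt
  exact pvGoA_eq_pvGoB line.toList 0
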